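-- pv_equiv track=rewrite | github.com/EAFIT-AACS/assignment2-arden | ALGORITHM\_3\_LFCO\_2025\_JJE.py | leftmost_derivation
-- ===== SOURCE A (Python) =====
-- def leftmost_derivation(string):
--     """
--     Constructs the leftmost derivation for the input string using grammar G.
--     For a string in the language {a^n b^n}, the derivation is:
--         S => a S b => a a S b b => ... => a^n S b^n => a^n ε b^n
--     Returns a list of sentential forms representing the derivation.
--     """
--     if string == "":
--         return ["S", "ε"]
--
--     # Verify that the string is of the form a^n b^n
--     n = len(string) // 2
--     if string != "a" * n + "b" * n:
--         return None  # The string is not generated by the grammar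
--
--     derivation = []
--     current = "S"
--     derivation.append(current)
--
--     # For each 'a' (and corresponding 'b'), apply the rule S -> a S b
--     for _ in range(n):
--         current = current.replace("S", "a S b", 1)
--         derivation.append(current)
--
--     # Finally, replace the remaining S with ε
--     current = current.replace("S", "ε", 1)
--     derivation.append(current)
--
--     return derivation
-- ===== SOURCE B (Python) =====
-- def leftmost_derivation(string):
--     if string == "":
--         return ["S", "\u03b5"]
--     n = len(string) // 2
--     if string != "a" * n + "b" * n:
--         return None
--     return ["a " * i + "S" + " b" * i for i in range(n + 1)] + ["a " * n + "\u03b5" + " b" * n]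
-- ===== Notes on version B (the rewrite author's own statement) =====
-- stated objective: simpler
-- what changed: B computes each sentential form directly from its index (a-prefix/b-suffix closed form) instead of threading a mutable string through successive count-limited replace calls.
import Mathlib
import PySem

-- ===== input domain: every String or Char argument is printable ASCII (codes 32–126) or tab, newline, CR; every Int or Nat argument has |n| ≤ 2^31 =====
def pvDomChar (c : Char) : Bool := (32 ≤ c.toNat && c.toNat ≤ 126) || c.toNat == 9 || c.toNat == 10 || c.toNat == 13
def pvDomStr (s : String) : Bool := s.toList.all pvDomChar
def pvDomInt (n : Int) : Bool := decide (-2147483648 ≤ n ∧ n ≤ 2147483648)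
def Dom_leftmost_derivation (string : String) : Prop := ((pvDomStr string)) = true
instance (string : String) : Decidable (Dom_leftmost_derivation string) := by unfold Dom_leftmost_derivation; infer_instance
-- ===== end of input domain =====

-- B builds each sentential form directly from its index instead of repeatedly rewriting the previous form; no speed claim.

-- ===== PORT A =====
-- current.replace(old, new, 1): replace the FIRST occurrence of old (exact hand port; PySem has no count-limited replace)
def pvReplaceFirst (s old new : List Char) : List Char :=
  if old.isPrefixOf s then new ++ s.drop old.length
  else
    match s with
    | [] => []
    | c :: rest => c :: pvReplaceFirst rest old new

def leftmost_derivation (string : String) : Option (List String) :=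
  let cs := string.toList
  if cs = [] then some ["S", "ε"]
  else
    let n := cs.length / 2
    if cs ≠ List.replicate n 'a' ++ List.replicate n 'b' then none
    else
      -- derivation = ["S"]; current = "S"; loop applying S -> a S b
      let p := (List.range n).foldl
        (fun (p : List (List Char) × List Char) _ =>
          let c' := pvReplaceFirst p.2 ['S'] ['a',' ','S',' ','b']
          (p.1 ++ [c'], c'))
        ([['S']], ['S'])
      let last := pvReplaceFirst p.2 ['S'] ['ε']
      some ((p.1 ++ [last]).map String.ofList)

-- ===== PORT B =====
-- "a " * i  and  " b" * i
def pvAs (i : Nat) : List Char := (List.replicate i ['a',' ']).flatten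
def pvBs (i : Nat) : List Char := (List.replicate i [' ','b']).flatten

def leftmost_derivation_alt (string : String) : Option (List String) :=
  let cs := string.toList
  if cs = [] then some ["S", "ε"]
  else
    let n := cs.length / 2
    if cs ≠ List.replicate n 'a' ++ List.replicate n 'b' then none
    else
      some (((List.range (n + 1)).map (fun i => String.ofList (pvAs i ++ 'S' :: pvBs i)))
            ++ [String.ofList (pvAs n ++ 'ε' :: pvBs n)])

-- ===== PRECONDITION & SPEC =====
def Spec_leftmost_derivation (string : String) (out : Option (List String)) : Prop := out = leftmost_derivation_alt string
instance (string : String) (out : Option (List String)) : Decidable (Spec_leftmost_derivation string out) := by unfold Spec_leftmost_derivation; infer_instance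

-- ===== CLAIM (what is proved, stated in full; the proofs are below) =====
def Claim_equal_leftmost_derivation : Prop := ∀ (string : String), Dom_leftmost_derivation string → Spec_leftmost_derivation string (leftmost_derivation string)

-- ===== LEMMAS AND PROOFS =====

-- form i : the i-th sentential form as a list of chars
def pvForm (i : Nat) : List Char := pvAs i ++ 'S' :: pvBs i

lemma pvReplaceFirst_at (aa bb new : List Char) (h : 'S' ∉ aa) :
    pvReplaceFirst (aa ++ 'S' :: bb) ['S'] new = aa ++ new ++ bb := by
  induction aa with
  | nil => simp [pvReplaceFirst, List.isPrefixOf]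
  | cons c aa ih =>
    have hc : c ≠ 'S' := fun hc => h (by simp [hc])
    have : (['S'].isPrefixOf (c :: (aa ++ 'S' :: bb))) = false := by
      simp [List.isPrefixOf]; exact fun hc' => absurd hc'.symm hc
    simp only [List.cons_append, pvReplaceFirst, this, Bool.false_eq_true, if_false]
    rw [ih (fun hm => h (List.mem_cons_of_mem _ hm))]

lemma pvS_not_mem_pvAs (i : Nat) : 'S' ∉ pvAs i := by
  intro h
  rw [pvAs] at h
  obtain ⟨l, hl, hx⟩ := List.mem_flatten.mp h
  rw [List.eq_of_mem_replicate hl] at hx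
  simp at hx

lemma pvForm_step (i : Nat) :
    pvReplaceFirst (pvForm i) ['S'] ['a',' ','S',' ','b'] = pvForm (i + 1) := by
  unfold pvForm
  rw [pvReplaceFirst_at _ _ _ (pvS_not_mem_pvAs i)]
  have ha : pvAs (i + 1) = pvAs i ++ ['a',' '] := by
    simp [pvAs, List.replicate_succ']
  have hb : pvBs (i + 1) = [' ','b'] ++ pvBs i := by
    simp [pvBs, List.replicate_succ]
  rw [ha, hb]
  simp

lemma pvForm_final (i : Nat) :
    pvReplaceFirst (pvForm i) ['S'] ['ε'] = pvAs i ++ 'ε' :: pvBs i := by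
  unfold pvForm
  rw [pvReplaceFirst_at _ _ _ (pvS_not_mem_pvAs i)]
  simp

lemma pvLoop_eq (n : Nat) :
    (List.range n).foldl
      (fun (p : List (List Char) × List Char) _ =>
        let c' := pvReplaceFirst p.2 ['S'] ['a',' ','S',' ','b']
        (p.1 ++ [c'], c'))
      ([['S']], ['S'])
    = ((List.range (n + 1)).map pvForm, pvForm n) := by
  induction n with
  | zero => simp [pvForm, pvAs, pvBs]
  | succ k ih =>
    rw [List.range_succ, List.foldl_append, ih]
    simp only [List.foldl_cons, List.foldl_nil]
    rw [List.range_succ (n := k + 1), List.map_append]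
    simp [pvForm_step k]

-- ===== VERDICT (by name: the statement is the Claim_ definition above) =====
theorem leftmost_derivation_spec : Claim_equal_leftmost_derivation := by
  intro s _
  unfold Spec_leftmost_derivation leftmost_derivation leftmost_derivation_alt
  by_cases h0 : s.toList = []
  · simp [h0]
  · simp only [h0, if_false, ite_not]
    split_ifs with hf
    · rw [pvLoop_eq, pvForm_final]
      simp only [List.map_append, List.map_map, List.map_cons, List.map_nil]
      rfl
    · rfl
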